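-- pv_equiv track=rewrite | github.com/snoworange0116/TIL | Algorithm_Problem/ETC/programmers/make_strange_str.py | solution
-- ===== SOURCE A (Python) =====
-- def solution(s):
--     tmp = list(s)
--     flag = 0
--     res = ''
--     for idx,val in enumerate(tmp):
--         if val != ' ':
--             if flag == 0:
--                 tmp[idx] = val.upper()
--                 flag = (flag + 1) % 2
--             else:
--                 tmp[idx] = val.lower()
--                 flag = (flag + 1) % 2
--         else:
--             flag = 0
--     for i in tmp:
--         res += i
--     return res
-- ===== SOURCE B (Python) =====
-- def solution(s):
--     return ' '.join(
--         ''.join(c.upper() if i % 2 == 0 else c.lower() for i, c in enumerate(w))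
--         for w in s.split(' ')
--     )
-- ===== Notes on version B (the rewrite author's own statement) =====
-- stated objective: idiomatic
-- what changed: Replaced A's single pass with a manually reset flag and character-by-character string accumulation by the idiomatic split-on-single-space / per-word index-parity map / space-join decomposition.
import Mathlib
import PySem

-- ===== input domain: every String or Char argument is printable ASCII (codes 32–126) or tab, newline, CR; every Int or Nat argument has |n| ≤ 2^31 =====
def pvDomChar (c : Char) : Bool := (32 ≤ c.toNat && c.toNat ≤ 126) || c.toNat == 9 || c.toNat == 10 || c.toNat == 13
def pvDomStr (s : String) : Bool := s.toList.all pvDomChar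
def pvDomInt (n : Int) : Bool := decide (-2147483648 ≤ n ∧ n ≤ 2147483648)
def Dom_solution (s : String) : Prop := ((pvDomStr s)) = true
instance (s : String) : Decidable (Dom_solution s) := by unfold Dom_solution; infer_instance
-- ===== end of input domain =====

-- B replaces A's flag-resetting single pass by the idiomatic split-on-single-space / per-word map / space-join decomposition (same cost).

-- ===== PORT A =====
-- the loop over enumerate(tmp): flag is the carried state; tmp[idx] = … becomes emitting the updated character
def solutionGo (flag : Int) (l : List Char) : List Char :=
  match l with
  | [] => []
  | val :: t =>
    if val ≠ ' ' then
      if flag == 0 then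
        PySem.Chars.upperChar val :: solutionGo (PySem.Int.mod (flag + 1) 2) t
      else
        PySem.Chars.lowerChar val :: solutionGo (PySem.Int.mod (flag + 1) 2) t
    else
      ' ' :: solutionGo 0 t

def solution (s : String) : String :=
  let tmp := s.toList
  let tmp := solutionGo 0 tmp
  -- for i in tmp: res += i
  let res := tmp.foldl (fun r c => r ++ [c]) ([] : List Char)
  String.ofList res

-- ===== PORT B =====
def solution_alt (s : String) : String :=
  String.ofList (PySem.Chars.join [' ']
    ((PySem.Chars.splitOn s.toList [' ']).map (fun w =>
      (PySem.List.enumerate w 0).map (fun p =>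
        if PySem.Int.mod p.1 2 == 0 then PySem.Chars.upperChar p.2
        else PySem.Chars.lowerChar p.2))))

-- ===== PRECONDITION & SPEC =====
def Spec_solution (s : String) (out : String) : Prop := out = solution_alt s
instance (s : String) (out : String) : Decidable (Spec_solution s out) := by unfold Spec_solution; infer_instance

-- ===== CLAIM (what is proved, stated in full; the proofs are below) =====
def Claim_equal_solution : Prop := ∀ (s : String), Dom_solution s → Spec_solution s (solution s)

-- ===== LEMMAS AND PROOFS =====

-- reference split: Python's s.split(' ') as a plain structural recursion with a prefix accumulator
def mySplit (pre : List Char) (l : List Char) : List (List Char) :=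
  match l with
  | [] => [pre]
  | c :: t => if c = ' ' then pre :: mySplit [] t else mySplit (pre ++ [c]) t

def bWordFrom (i : Int) (w : List Char) : List Char :=
  (PySem.List.enumerate w i).map (fun p =>
    if PySem.Int.mod p.1 2 == 0 then PySem.Chars.upperChar p.2 else PySem.Chars.lowerChar p.2)

def tailJoin (ws : List (List Char)) : List Char :=
  match ws with
  | [] => []
  | w :: t => ' ' :: (bWordFrom 0 w ++ tailJoin t)

lemma go_spec (fuel : Nat) : ∀ (l cur : List Char) (accs : List (List Char)),
    l.length < fuel →
    PySem.Chars.splitOn.go [' '] fuel l cur accs = accs.reverse ++ mySplit cur.reverse l := by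
  induction fuel with
  | zero => intro l cur accs h; omega
  | succ f ih =>
    intro l cur accs h
    match l with
    | [] => simp [PySem.Chars.splitOn.go, mySplit]
    | c :: rest =>
      by_cases hc : c = ' '
      · subst hc
        rw [PySem.Chars.splitOn.go]
        have hp : ([' '].isPrefixOf (' ' :: rest)) = true := by simp [List.isPrefixOf]
        rw [hp, if_pos rfl]
        simp only [show List.drop [' '].length (' ' :: rest) = rest from rfl]
        rw [ih rest [] (cur.reverse :: accs) (by simp at h ⊢; omega)]
        simp [mySplit]
      · rw [PySem.Chars.splitOn.go]
        have hp : ([' '].isPrefixOf (c :: rest)) = false := by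
          simp [List.isPrefixOf]; exact fun h' => hc h'.symm
        simp only [hp, Bool.false_eq_true, if_false]
        rw [ih rest (c :: cur) accs (by simp at h ⊢; omega)]
        simp [mySplit, hc]

lemma splitOn_eq_mySplit (l : List Char) :
    PySem.Chars.splitOn l [' '] = mySplit [] l := by
  unfold PySem.Chars.splitOn
  simpa using go_spec (l.length + 1) l [] [] (by omega)

-- the head of mySplit absorbs the accumulator
lemma mySplit_pre (l : List Char) : ∀ pre,
    mySplit pre l = (pre ++ (mySplit [] l).head!) :: (mySplit [] l).tail := by
  induction l with
  | nil => intro pre; simp [mySplit]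
  | cons c t ih =>
    intro pre
    by_cases hc : c = ' '
    · subst hc; simp [mySplit]
    · simp only [mySplit, if_neg hc]
      rw [ih (pre ++ [c]), ih ([] ++ [c])]
      simp

lemma fmod_cast (n : Nat) : PySem.Int.mod (n : Int) 2 = ((n % 2 : Nat) : Int) := by
  unfold PySem.Int.mod
  rw [Int.fmod_eq_emod_of_nonneg _ (by omega)]
  omega

lemma fmod_succ (n : Nat) :
    PySem.Int.mod (PySem.Int.mod (n : Int) 2 + 1) 2 = PySem.Int.mod ((n + 1 : Nat) : Int) 2 := by
  rw [fmod_cast, fmod_cast]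
  unfold PySem.Int.mod
  rw [Int.fmod_eq_emod_of_nonneg _ (by omega)]
  omega

lemma main_lemma (l : List Char) : ∀ (n : Nat),
    solutionGo (PySem.Int.mod (n : Int) 2) l =
      bWordFrom (n : Int) (mySplit [] l).head! ++ tailJoin (mySplit [] l).tail := by
  induction l with
  | nil => intro n; simp [solutionGo, mySplit, tailJoin, bWordFrom]
  | cons c t ih =>
    intro n
    by_cases hc : c = ' '
    · subst hc
      simp only [mySplit]
      rw [mySplit_pre t []]
      simp only [solutionGo, ne_eq, not_true_eq_false, if_false, List.nil_append]
      have h0 := ih 0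
      rw [show (0 : Int) = PySem.Int.mod ((0 : Nat) : Int) 2 by rw [fmod_cast]; norm_num]
      rw [h0]
      simp [tailJoin, bWordFrom]
    · simp only [mySplit, if_neg hc]
      rw [mySplit_pre t ([] ++ [c])]
      simp only [solutionGo, ne_eq, hc, not_false_eq_true, if_true, List.head!_cons,
        List.tail_cons, List.nil_append]
      rw [fmod_succ n, ih (n + 1)]
      simp only [bWordFrom, List.cons_append, PySem.List.enumerate_cons, List.map_cons,
        Nat.cast_add, Nat.cast_one]
      cases PySem.Int.mod (n : Int) 2 == 0 <;> simp

lemma foldl_app (l : List Char) : ∀ acc : List Char,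
    l.foldl (fun r c => r ++ [c]) acc = acc ++ l := by
  induction l with
  | nil => simp
  | cons c t ih => intro acc; simp [List.foldl_cons, ih]

lemma join_map (ws : List (List Char)) (w : List Char) :
    PySem.Chars.join [' '] ((w :: ws).map (bWordFrom 0)) = bWordFrom 0 w ++ tailJoin ws := by
  induction ws generalizing w with
  | nil => simp [PySem.Chars.join_singleton, tailJoin]
  | cons v t ih =>
    simp only [List.map_cons] at ih ⊢
    rw [PySem.Chars.join_cons_cons, ih v]
    simp [tailJoin]

-- ===== VERDICT (by name: the statement is the Claim_ definition above) =====
theorem solution_spec : Claim_equal_solution := by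
  intro s _
  unfold Spec_solution solution solution_alt
  simp only []
  rw [foldl_app, List.nil_append, splitOn_eq_mySplit]
  have hm := main_lemma s.toList 0
  rw [fmod_cast 0] at hm
  norm_num at hm
  rw [hm]
  rcases hsp : mySplit [] s.toList with _ | ⟨w, ws⟩
  · -- mySplit is never empty
    exfalso
    have h := mySplit_pre s.toList []
    rw [hsp] at h
    simp at h
  · simp only [List.head!_cons, List.tail_cons]
    rw [← join_map]
    rfl
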